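-- pv_equiv track=rewrite | github.com/eaallen91/Bioinformatics_Contig_Assymbly | haplotypeAssembly.py | buildFragConflict
-- ===== SOURCE A (Python) =====
-- def buildFragConflict(finalFrags, conflictMatrix):
--     ############### Build fragment conflict graph ####################
--     #### Builds the fragment conflict graph by finding a snp in one row
--     #### and by finding another row with a conflicting letter in the same
--     #### col.
--     conflictGraph = [ [] for i in range(len(finalFrags)) ]
--     for row in range(len(conflictMatrix)):
--         for col in range(len(conflictMatrix[row])):
--             if conflictMatrix[row][col] != '0':
--                 SNP = conflictMatrix[row][col]
--                 for innerRow in range(len(conflictMatrix)):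
--                     if conflictMatrix[innerRow][col] != '0':
--                         if conflictMatrix[innerRow][col] != SNP:
--                             if innerRow not in conflictGraph[row] and innerRow != row:
--                                 conflictGraph[row].append(innerRow)
--     return conflictGraph
-- ===== SOURCE B (Python) =====
-- def buildFragConflict(finalFrags, conflictMatrix):
--     # Column-major re-implementation: gather each column's nonzero entries once,
--     # then pair up conflicting entries within the column.
--     graph = [[] for _ in finalFrags]
--     width = 0
--     for row in conflictMatrix:
--         if len(row) > width:
--             width = len(row)
--     for col in range(width):
--         entries = []
--         for r in range(len(conflictMatrix)):
--             row = conflictMatrix[r]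
--             if col < len(row) and row[col] != '0':
--                 entries.append((r, row[col]))
--         for r, snp in entries:
--             for j, letter in entries:
--                 if letter != snp and j != r and j not in graph[r]:
--                     graph[r].append(j)
--     return graph
-- ===== Notes on version B (the rewrite author's own statement) =====
-- stated objective: alternative
-- what changed: Inverted the loop nesting to column-major: each column's nonzero entries are collected once into a list, and conflicting pairs are generated by scanning that per-column entry list, instead of A's row-major triple loop that rescans all rows for every nonzero cell.
import Mathlib
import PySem

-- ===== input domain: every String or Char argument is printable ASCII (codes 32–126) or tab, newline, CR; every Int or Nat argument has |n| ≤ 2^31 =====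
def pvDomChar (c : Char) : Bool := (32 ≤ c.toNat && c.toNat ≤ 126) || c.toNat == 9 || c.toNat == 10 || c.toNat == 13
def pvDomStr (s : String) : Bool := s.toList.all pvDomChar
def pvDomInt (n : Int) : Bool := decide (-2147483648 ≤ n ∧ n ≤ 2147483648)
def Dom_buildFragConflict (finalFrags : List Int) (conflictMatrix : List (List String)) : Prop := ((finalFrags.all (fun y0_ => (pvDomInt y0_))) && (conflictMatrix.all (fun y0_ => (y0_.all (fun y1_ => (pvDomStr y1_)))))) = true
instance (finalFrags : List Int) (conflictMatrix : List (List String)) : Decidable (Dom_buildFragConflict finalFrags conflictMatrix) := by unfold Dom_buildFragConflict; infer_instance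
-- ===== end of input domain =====

-- B builds the conflict graph column-major (per-column nonzero entry lists) instead of A's row-major triple loop; same result.

-- ===== PORT A =====
def buildFragConflict (finalFrags : List Int) (conflictMatrix : List (List String)) : List (List Int) :=
  let init := (List.range finalFrags.length).map (fun _ => ([] : List Int))
  (List.range conflictMatrix.length).foldl (fun g row =>
    (List.range ((conflictMatrix.getD row []).length)).foldl (fun g col =>
      if (conflictMatrix.getD row []).getD col "0" ≠ "0" then
        let SNP := (conflictMatrix.getD row []).getD col "0"
        (List.range conflictMatrix.length).foldl (fun g innerRow =>
          if (conflictMatrix.getD innerRow []).getD col "0" ≠ "0" then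
            if (conflictMatrix.getD innerRow []).getD col "0" ≠ SNP then
              if ((innerRow : Int) ∉ g.getD row []) ∧ innerRow ≠ row then
                g.modify row (fun l => l ++ [(innerRow : Int)])
              else g
            else g
          else g) g
      else g) g) init

-- ===== PORT B =====
def buildFragConflict_alt (finalFrags : List Int) (conflictMatrix : List (List String)) : List (List Int) :=
  let graph := finalFrags.map (fun _ => ([] : List Int))
  let width := conflictMatrix.foldl (fun w row => if row.length > w then row.length else w) 0
  (List.range width).foldl (fun g col =>
    let entries := (List.range conflictMatrix.length).foldl (fun es r =>
      let row := conflictMatrix.getD r []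
      if col < row.length ∧ row.getD col "0" ≠ "0" then es ++ [(r, row.getD col "0")] else es)
      ([] : List (Nat × String))
    entries.foldl (fun g p =>
      entries.foldl (fun g q =>
        if q.2 ≠ p.2 ∧ q.1 ≠ p.1 ∧ ((q.1 : Int) ∉ g.getD p.1 []) then
          g.modify p.1 (fun l => l ++ [(q.1 : Int)])
        else g) g) g) graph

-- ===== PRECONDITION & SPEC =====
-- Pre_ excludes exactly the inputs on which the Python A raises IndexError: a nonzero
-- cell whose column is missing from some (shorter) row, or a row index with a conflicting
-- partner that is out of range of the conflictGraph list (len(finalFrags) too small).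
def Pre_buildFragConflict (finalFrags : List Int) (conflictMatrix : List (List String)) : Prop :=
  ∀ i, i < conflictMatrix.length → ∀ c, c < (conflictMatrix.getD i []).length →
    (conflictMatrix.getD i []).getD c "0" ≠ "0" →
    (∀ j, j < conflictMatrix.length → c < (conflictMatrix.getD j []).length) ∧
    (((List.range conflictMatrix.length).any (fun j =>
        ((conflictMatrix.getD j []).getD c "0" != "0") &&
        ((conflictMatrix.getD j []).getD c "0" != (conflictMatrix.getD i []).getD c "0"))) = true →
      i < finalFrags.length)
instance (finalFrags : List Int) (conflictMatrix : List (List String)) : Decidable (Pre_buildFragConflict finalFrags conflictMatrix) := by unfold Pre_buildFragConflict; infer_instance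

def pvWitness_buildFragConflict : List Int × List (List String) :=
  ([7, 9], [["A", "0"], ["C", "0"]])

def Spec_buildFragConflict (finalFrags : List Int) (conflictMatrix : List (List String)) (out : List (List Int)) : Prop := out = buildFragConflict_alt finalFrags conflictMatrix
instance (finalFrags : List Int) (conflictMatrix : List (List String)) (out : List (List Int)) : Decidable (Spec_buildFragConflict finalFrags conflictMatrix out) := by unfold Spec_buildFragConflict; infer_instance

-- ===== CLAIM (what is proved, stated in full; the proofs are below) =====
def Claim_equal_buildFragConflict : Prop := ∀ (finalFrags : List Int) (conflictMatrix : List (List String)), Dom_buildFragConflict finalFrags conflictMatrix → Pre_buildFragConflict finalFrags conflictMatrix → Spec_buildFragConflict finalFrags conflictMatrix (buildFragConflict finalFrags conflictMatrix)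

-- ===== LEMMAS AND PROOFS =====

-- the cell value Python reads as conflictMatrix[r][c], with "0" outside the ragged bounds
def pvCell (cm : List (List String)) (r c : Nat) : String := (cm.getD r []).getD c "0"

-- one dedup-append event "append innerRow j to conflictGraph[r]"
def pvStep (g : List (List Int)) (p : Nat × Nat) : List (List Int) :=
  if ((p.2 : Int) ∉ g.getD p.1 []) ∧ p.2 ≠ p.1 then g.modify p.1 (fun l => l ++ [(p.2 : Int)]) else g

def pvJs (cm : List (List String)) (c : Nat) (snp : String) : List Nat :=
  (List.range cm.length).filter (fun j => decide (pvCell cm j c ≠ "0" ∧ pvCell cm j c ≠ snp))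

def pvEvtsA (cm : List (List String)) (r c : Nat) : List (Nat × Nat) :=
  if pvCell cm r c ≠ "0" then (pvJs cm c (pvCell cm r c)).map (fun j => (r, j)) else []

def pvEventsA (cm : List (List String)) : List (Nat × Nat) :=
  (List.range cm.length).flatMap (fun r =>
    (List.range ((cm.getD r []).length)).flatMap (fun c => pvEvtsA cm r c))

def pvEntries (cm : List (List String)) (c : Nat) : List (Nat × String) :=
  (List.range cm.length).filter (fun r => decide (c < (cm.getD r []).length ∧ pvCell cm r c ≠ "0"))
    |>.map (fun r => (r, pvCell cm r c))

def pvWidth (cm : List (List String)) : Nat :=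
  cm.foldl (fun w row => if row.length > w then row.length else w) 0

def pvEventsB (cm : List (List String)) : List (Nat × Nat) :=
  (List.range (pvWidth cm)).flatMap (fun c =>
    (pvEntries cm c).flatMap (fun p =>
      ((pvEntries cm c).filter (fun q => decide (q.2 ≠ p.2))).map (fun q => (p.1, q.1))))

def pvRowEvs (r : Nat) (evs : List (Nat × Nat)) : List Nat :=
  (evs.filter (fun p => p.1 == r)).map (·.2)

theorem pv_foldl_flatMap {α β σ : Type} (f : σ → β → σ) (g : α → List β) :
    ∀ (l : List α) (init : σ), (l.flatMap g).foldl f init = l.foldl (fun s x => (g x).foldl f s) init := by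
  intro l
  induction l with
  | nil => intro init; rfl
  | cons a t ih => intro init; simp [List.flatMap_cons, List.foldl_append, ih]

theorem pv_A_events (ff : List Int) (cm : List (List String)) :
    buildFragConflict ff cm = (pvEventsA cm).foldl pvStep ((List.range ff.length).map (fun _ => ([] : List Int))) := by
  unfold buildFragConflict pvEventsA
  simp only [pv_foldl_flatMap]
  congr 1
  funext g row
  congr 1
  funext g col
  by_cases h : (cm.getD row []).getD col "0" ≠ "0"
  · simp only [pvEvtsA, pvCell, if_pos h, List.foldl_map, pvJs,
      ← PySem.List.foldl_if_eq_foldl_filter]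
    congr 1
    funext g j
    simp only [pvStep]
    split_ifs <;> simp_all
  · simp only [pvEvtsA, pvCell, if_neg h]
    rfl

theorem pv_B_events (ff : List Int) (cm : List (List String)) :
    buildFragConflict_alt ff cm = (pvEventsB cm).foldl pvStep (ff.map (fun _ => ([] : List Int))) := by
  unfold buildFragConflict_alt pvEventsB pvWidth
  simp only [pv_foldl_flatMap]
  congr 1
  funext g col
  have hent : (List.range cm.length).foldl (fun es r =>
      let row := cm.getD r []
      if col < row.length ∧ row.getD col "0" ≠ "0" then es ++ [(r, row.getD col "0")] else es)
      ([] : List (Nat × String)) = pvEntries cm col := by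
    rw [PySem.List.foldl_append_ite (p := fun r =>
      col < (cm.getD r []).length ∧ (cm.getD r []).getD col "0" ≠ "0")
      (f := fun r => (r, (cm.getD r []).getD col "0"))]
    simp [pvEntries, pvCell]
  rw [hent]
  congr 1
  funext g p
  simp only [List.foldl_map, ← PySem.List.foldl_if_eq_foldl_filter]
  congr 1
  funext g q
  simp only [pvStep]
  split_ifs <;> simp_all

theorem pv_step_length (evs : List (Nat × Nat)) (g : List (List Int)) :
    (evs.foldl pvStep g).length = g.length := by
  induction evs generalizing g with
  | nil => rfl
  | cons a t ih =>
      simp only [List.foldl_cons, ih]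
      unfold pvStep
      split <;> simp

theorem pv_modify_length (g : List (List Int)) (p : Nat × Nat) : (pvStep g p).length = g.length := by
  unfold pvStep; split <;> simp

theorem pv_step_proj (evs : List (Nat × Nat)) (g : List (List Int)) (r : Nat) (hr : r < g.length) :
    (evs.foldl pvStep g).getD r [] =
      (pvRowEvs r evs).foldl (fun l (j : Nat) => if ((j : Int) ∉ l) ∧ j ≠ r then l ++ [(j : Int)] else l) (g.getD r []) := by
  induction evs generalizing g with
  | nil => simp [pvRowEvs]
  | cons p t ih =>
      have hr' : r < (pvStep g p).length := by rw [pv_modify_length]; exact hr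
      simp only [List.foldl_cons]
      rw [ih _ hr']
      by_cases hp : p.1 = r
      · have h1 : pvRowEvs r (p :: t) = p.2 :: pvRowEvs r t := by
          simp [pvRowEvs, hp]
        rw [h1, List.foldl_cons]
        congr 1
        subst hp
        unfold pvStep
        split
        · rename_i hcond
          rw [List.getD_eq_getElem?_getD, List.getElem?_modify_eq,
              List.getElem?_eq_getElem hr]
          rw [List.getD_eq_getElem?_getD, List.getElem?_eq_getElem hr]
          rfl
        · rfl
      · have h1 : pvRowEvs r (p :: t) = pvRowEvs r t := by
          simp [pvRowEvs, hp]
        rw [h1]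
        congr 1
        unfold pvStep
        split
        · rw [List.getD_eq_getElem?_getD, List.getElem?_modify_ne _ _ hp,
              ← List.getD_eq_getElem?_getD]
        · rfl

theorem pv_rowEvs_append (r : Nat) (l1 l2 : List (Nat × Nat)) :
    pvRowEvs r (l1 ++ l2) = pvRowEvs r l1 ++ pvRowEvs r l2 := by
  simp [pvRowEvs]

theorem pv_rowEvs_flatMap {α : Type} (r : Nat) (f : α → List (Nat × Nat)) (l : List α) :
    pvRowEvs r (l.flatMap f) = l.flatMap (fun x => pvRowEvs r (f x)) := by
  induction l with
  | nil => simp [pvRowEvs]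
  | cons a t ih => simp only [List.flatMap_cons, pv_rowEvs_append, ih]

theorem pv_filter_const {α : Type} (l : List α) (b : Bool) :
    l.filter (fun _ => b) = if b then l else [] := by
  cases b <;> simp

theorem pv_flatMap_congr {α β : Type} {l : List α} {f g : α → List β}
    (h : ∀ x ∈ l, f x = g x) : l.flatMap f = l.flatMap g := by
  induction l with
  | nil => rfl
  | cons a t ih =>
      simp only [List.flatMap_cons, h a (List.mem_cons_self), ih (fun x hx => h x (List.mem_cons_of_mem _ hx))]

theorem pv_flatMap_filter {α β : Type} (p : α → Bool) (g : α → List β) (l : List α) :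
    (l.filter p).flatMap g = l.flatMap (fun x => if p x then g x else []) := by
  induction l with
  | nil => rfl
  | cons a t ih =>
      cases hpa : p a <;> simp [hpa, ih]

theorem pv_flatMap_single (n r : Nat) (f : Nat → List Nat) :
    (List.range n).flatMap (fun x => if x = r then f x else []) = if r < n then f r else [] := by
  induction n with
  | zero => simp
  | succ n ih =>
      rw [List.range_succ, List.flatMap_append, ih]
      simp only [List.flatMap_cons, List.flatMap_nil, List.append_nil]
      by_cases h1 : r < n
      · have h2 : ¬ n = r := by omega
        have h3 : r < n + 1 := by omega
        simp [h1, h2, h3]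
      · by_cases h2 : n = r
        · subst h2
          simp
        · have h3 : ¬ r < n + 1 := by omega
          simp [h1, h2, h3]

theorem pv_cell_lt (cm : List (List String)) (j c : Nat) (h : pvCell cm j c ≠ "0") :
    c < (cm.getD j []).length := by
  by_contra hc
  exact h (List.getD_eq_default _ _ (by omega))

theorem pv_rowEvs_evtsA (cm : List (List String)) (r r' c : Nat) :
    pvRowEvs r (pvEvtsA cm r' c) =
      if r' = r then (if pvCell cm r' c ≠ "0" then pvJs cm c (pvCell cm r' c) else []) else [] := by
  unfold pvEvtsA pvRowEvs
  by_cases h2 : r' = r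
  · subst h2
    by_cases h : pvCell cm r' c = "0"
    · simp [h]
    · simp [h, List.filter_map, Function.comp_def, List.map_map]
  · by_cases h : pvCell cm r' c = "0"
    · simp [h, h2]
    · simp [h, h2, List.filter_map, Function.comp_def, pv_filter_const]

theorem pv_rowEvs_A (cm : List (List String)) (r : Nat) :
    pvRowEvs r (pvEventsA cm) =
      if r < cm.length then
        (List.range ((cm.getD r []).length)).flatMap (fun c =>
          if pvCell cm r c ≠ "0" then pvJs cm c (pvCell cm r c) else [])
      else [] := by
  unfold pvEventsA
  simp only [pv_rowEvs_flatMap]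
  have h1 : ∀ r' ∈ List.range cm.length,
      (List.range ((cm.getD r' []).length)).flatMap (fun c => pvRowEvs r (pvEvtsA cm r' c)) =
      (fun r' => if r' = r then
          (List.range ((cm.getD r' []).length)).flatMap (fun c =>
            if pvCell cm r' c ≠ "0" then pvJs cm c (pvCell cm r' c) else [])
        else []) r' := by
    intro r' _
    by_cases h2 : r' = r
    · subst h2
      dsimp only
      rw [if_pos rfl]
      exact pv_flatMap_congr (fun c _ => by rw [pv_rowEvs_evtsA, if_pos rfl])
    · simp only [if_neg h2]
      rw [List.flatMap_eq_nil_iff]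
      intro c _
      rw [pv_rowEvs_evtsA, if_neg h2]
  rw [pv_flatMap_congr h1, pv_flatMap_single]

def pvBJs (cm : List (List String)) (c : Nat) (snp : String) : List Nat :=
  ((pvEntries cm c).filter (fun q => decide (q.2 ≠ snp))).map (·.1)

theorem pv_BJs (cm : List (List String)) (c : Nat) (snp : String) :
    pvBJs cm c snp = pvJs cm c snp := by
  unfold pvBJs pvEntries pvJs
  rw [List.filter_map, List.map_map]
  have h1 : ((fun (q : Nat × String) => decide (q.2 ≠ snp)) ∘
      (fun r => (r, pvCell cm r c))) = fun r => decide (pvCell cm r c ≠ snp) := rfl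
  rw [h1, List.filter_filter]
  have h2 : ((fun (q : Nat × String) => q.1) ∘ (fun r => (r, pvCell cm r c))) = id := rfl
  rw [h2, List.map_id]
  apply List.filter_congr
  intro j _
  by_cases ha : pvCell cm j c = "0"
  · simp [pvCell] at *
    simp [ha]
  · have hb : c < (cm.getD j []).length := pv_cell_lt cm j c ha
    by_cases hc : pvCell cm j c = snp <;> simp [pvCell] at * <;> simp_all

theorem pv_ite_swap {P Q : Prop} [Decidable P] [Decidable Q] (x : List Nat) :
    (if P then (if Q then x else []) else []) = (if Q then (if P then x else []) else []) := by
  by_cases hp : P <;> by_cases hq : Q <;> simp [hp, hq]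

theorem pv_rowEvs_colB (cm : List (List String)) (r c : Nat) :
    pvRowEvs r ((pvEntries cm c).flatMap (fun p =>
        ((pvEntries cm c).filter (fun q => decide (q.2 ≠ p.2))).map (fun q => (p.1, q.1)))) =
      if r < cm.length ∧ c < (cm.getD r []).length ∧ pvCell cm r c ≠ "0" then
        pvJs cm c (pvCell cm r c) else [] := by
  rw [pv_rowEvs_flatMap]
  have h1 : ∀ p ∈ pvEntries cm c,
      pvRowEvs r (((pvEntries cm c).filter (fun q => decide (q.2 ≠ p.2))).map (fun q => (p.1, q.1))) =
      (fun p : Nat × String => if p.1 = r then pvBJs cm c p.2 else []) p := by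
    intro p _
    unfold pvRowEvs pvBJs
    rw [List.filter_map]
    by_cases h : p.1 = r
    · simp [h, Function.comp_def, List.map_map]
    · simp [h, Function.comp_def]
  rw [pv_flatMap_congr h1]
  have hE : pvEntries cm c =
      ((List.range cm.length).filter (fun j =>
        decide (c < (cm.getD j []).length ∧ pvCell cm j c ≠ "0"))).map
        (fun j => (j, pvCell cm j c)) := rfl
  rw [hE, List.flatMap_map, pv_flatMap_filter]
  have h2 : ∀ j ∈ List.range cm.length,
      (fun j => if decide (c < (cm.getD j []).length ∧ pvCell cm j c ≠ "0") then
          (if (j, pvCell cm j c).1 = r then pvBJs cm c (j, pvCell cm j c).2 else [])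
        else ([] : List Nat)) j =
      (fun j => if j = r then
          (if decide (c < (cm.getD j []).length ∧ pvCell cm j c ≠ "0") then
            pvBJs cm c (pvCell cm j c) else [])
        else []) j := by
    intro j _
    exact pv_ite_swap _
  rw [pv_flatMap_congr h2, pv_flatMap_single, pv_BJs]
  by_cases hr : r < cm.length
  · by_cases h0 : pvCell cm r c ≠ "0"
    · simp [hr, h0]
    · simp [hr, h0]
  · simp [hr]

theorem pv_len_le_width (cm : List (List String)) (r : Nat) (h : r < cm.length) :
    (cm.getD r []).length ≤ pvWidth cm := by
  unfold pvWidth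
  have hfun : (fun (w : Nat) (row : List String) => if row.length > w then row.length else w) =
      fun w row => max w row.length := by
    funext w row
    by_cases hh : row.length > w <;> simp [hh] <;> omega
  rw [hfun]
  have hmem : cm.getD r [] ∈ cm := by
    have he : cm.getD r [] = cm[r] := by
      rw [List.getD_eq_getElem?_getD, List.getElem?_eq_getElem h]
      rfl
    rw [he]
    exact List.getElem_mem h
  exact (PySem.List.le_foldl_max_nat cm (fun row => row.length) 0).2 _ hmem

theorem pv_rowEvs_eq (cm : List (List String)) (r : Nat) :
    pvRowEvs r (pvEventsA cm) = pvRowEvs r (pvEventsB cm) := by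
  have hB : pvRowEvs r (pvEventsB cm) = (List.range (pvWidth cm)).flatMap (fun c =>
      if r < cm.length ∧ c < (cm.getD r []).length ∧ pvCell cm r c ≠ "0" then
        pvJs cm c (pvCell cm r c) else []) := by
    unfold pvEventsB
    rw [pv_rowEvs_flatMap]
    exact pv_flatMap_congr (fun c _ => pv_rowEvs_colB cm r c)
  rw [pv_rowEvs_A, hB]
  by_cases hr : r < cm.length
  · rw [if_pos hr]
    have hle : (cm.getD r []).length ≤ pvWidth cm := pv_len_le_width cm r hr
    obtain ⟨k, hk⟩ : ∃ k, pvWidth cm = (cm.getD r []).length + k :=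
      ⟨pvWidth cm - (cm.getD r []).length, by omega⟩
    rw [hk, List.range_add, List.flatMap_append]
    have hfst : (List.range ((cm.getD r []).length)).flatMap (fun c =>
        if r < cm.length ∧ c < (cm.getD r []).length ∧ pvCell cm r c ≠ "0" then
          pvJs cm c (pvCell cm r c) else []) =
        (List.range ((cm.getD r []).length)).flatMap (fun c =>
          if pvCell cm r c ≠ "0" then pvJs cm c (pvCell cm r c) else []) := by
      apply pv_flatMap_congr
      intro c hc
      rw [List.mem_range] at hc
      by_cases h0 : pvCell cm r c ≠ "0"
      · rw [if_pos ⟨hr, hc, h0⟩, if_pos h0]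
      · rw [if_neg (by tauto), if_neg h0]
    have hsnd : ((List.range k).map (fun x => (cm.getD r []).length + x)).flatMap (fun c =>
        if r < cm.length ∧ c < (cm.getD r []).length ∧ pvCell cm r c ≠ "0" then
          pvJs cm c (pvCell cm r c) else []) = [] := by
      rw [List.flatMap_eq_nil_iff]
      intro c hcm
      rw [List.mem_map] at hcm
      obtain ⟨x, _, hx⟩ := hcm
      have hnc : ¬ c < (cm.getD r []).length := by omega
      exact if_neg (fun h => hnc h.2.1)
    rw [hfst, hsnd, List.append_nil]
  · rw [if_neg hr]
    symm
    rw [List.flatMap_eq_nil_iff]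
    intro c _
    simp [hr]

-- ===== VERDICT (by name: the statement is the Claim_ definition above) =====
theorem buildFragConflict_spec : Claim_equal_buildFragConflict := by
  intro ff cm _ hpre
  unfold Spec_buildFragConflict
  rw [pv_A_events, pv_B_events]
  have hinit : (List.range ff.length).map (fun _ => ([] : List Int)) = ff.map (fun _ => ([] : List Int)) := by
    simp [List.map_const']
  rw [hinit]
  set init := ff.map (fun _ => ([] : List Int)) with hinitdef
  have hlen : ∀ evs : List (Nat × Nat), (evs.foldl pvStep init).length = init.length := fun evs => pv_step_length evs init
  apply List.ext_getElem (by rw [hlen, hlen])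
  intro n h1 h2
  have hn : n < init.length := by rw [hlen] at h1; exact h1
  have e1 : ((pvEventsA cm).foldl pvStep init)[n] = ((pvEventsA cm).foldl pvStep init).getD n [] := by
    rw [List.getD_eq_getElem?_getD, List.getElem?_eq_getElem h1]; rfl
  have e2 : ((pvEventsB cm).foldl pvStep init)[n] = ((pvEventsB cm).foldl pvStep init).getD n [] := by
    rw [List.getD_eq_getElem?_getD, List.getElem?_eq_getElem h2]; rfl
  rw [e1, e2, pv_step_proj _ _ _ hn, pv_step_proj _ _ _ hn, pv_rowEvs_eq cm n]
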